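-- pv_equiv track=rewrite | github.com/painwall/task- | database_sorting.py | cycle_idNameTask_idNameSubtask
-- ===== SOURCE A (Python) =====
-- def cycle_idNameTask_idNameSubtask(task_or_subtask, idDate, idTime):
--     dict_elements = {}
--     for el in task_or_subtask:
--         type = el[0]
--         id = el[1]
--         ind_date = None
--         ind_time = None
--
--         for el_date in idDate:
--             for i in range(2, len(el_date)):
--                 if el_date[1] == type and el_date[i] == id:
--                     ind_date = idDate.index(el_date)
--
--         for el_time in idTime:
--             for i in range(2, len(el_time)):
--                 if el_time[1] == type and el_time[i] == id:
--                     ind_time = idTime.index(el_time)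
--
--         if ind_date != None:
--             if ind_time == None:
--                 ind_time = 0
--         else:
--             ind_date = -1
--             ind_time = 0
--
--         if int(str(ind_date) + str(ind_time)) not in dict_elements:
--             dict_elements[int(str(ind_date) + str(ind_time))] = [el]
--         else:
--             dict_elements[int(str(ind_date) + str(ind_time))].append(el)
--
--         task_or_subtask = []
--
--     for el in sorted(dict_elements.keys()):
--         task_or_subtask.extend(dict_elements[el])
--
--     return task_or_subtask
-- ===== SOURCE B (Python) =====
-- def cycle_idNameTask_idNameSubtask(task_or_subtask, idDate, idTime):
--     def locate(rows, t, i):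
--         # last matching row wins, so scan from the back; .index gives the
--         # position of the first row equal to it (matters for duplicate rows)
--         for r in reversed(rows):
--             if len(r) > 2 and r[1] == t and i in r[2:]:
--                 return rows.index(r)
--         return None
--
--     def key(el):
--         d = locate(idDate, el[0], el[1])
--         if d is None:
--             d, tm = -1, 0
--         else:
--             tm = locate(idTime, el[0], el[1])
--             if tm is None:
--                 tm = 0
--         return int(str(d) + str(tm))
--
--     return sorted(task_or_subtask, key=key)
-- ===== Notes on version B (the rewrite author's own statement) =====
-- stated objective: simpler
-- what changed: B replaces A's dict-bucketing-then-extend-over-sorted-keys with one stable sorted(...) call on a key function, and replaces A's nested index loops with last-match overwriting by a reversed scan with early exit and a slice membership test.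
import Mathlib
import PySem

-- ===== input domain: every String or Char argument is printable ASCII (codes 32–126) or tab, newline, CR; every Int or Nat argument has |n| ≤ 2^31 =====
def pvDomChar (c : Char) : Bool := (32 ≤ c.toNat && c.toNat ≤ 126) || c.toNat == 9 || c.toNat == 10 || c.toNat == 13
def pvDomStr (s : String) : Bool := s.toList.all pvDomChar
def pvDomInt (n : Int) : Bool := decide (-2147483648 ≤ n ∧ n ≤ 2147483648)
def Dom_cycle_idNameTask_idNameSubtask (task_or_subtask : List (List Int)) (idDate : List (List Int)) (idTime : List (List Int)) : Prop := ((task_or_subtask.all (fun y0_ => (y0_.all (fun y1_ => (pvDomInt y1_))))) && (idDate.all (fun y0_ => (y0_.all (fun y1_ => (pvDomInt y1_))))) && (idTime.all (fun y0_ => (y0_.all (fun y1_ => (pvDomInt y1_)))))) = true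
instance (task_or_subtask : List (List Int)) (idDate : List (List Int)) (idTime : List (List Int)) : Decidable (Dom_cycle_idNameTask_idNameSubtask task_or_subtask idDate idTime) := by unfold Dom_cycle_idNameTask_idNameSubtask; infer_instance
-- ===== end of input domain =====

-- B replaces A's dict-bucketing followed by an extend-over-sorted-keys pass with a single
-- stable sort on a key function, and A's nested overwrite-on-match index loops with a
-- reversed scan that exits on the first (i.e. last) matching row; return values agree,
-- neither implementation mutates its arguments (A only rebinds its parameter).

-- ===== PORT A =====
def cycle_idNameTask_idNameSubtask (task_or_subtask : List (List Int)) (idDate : List (List Int)) (idTime : List (List Int)) : List (List Int) :=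
  let dict_elements : PySem.Dict Int (List (List Int)) :=
    task_or_subtask.foldl (fun dict_elements el =>
      let type := PySem.List.pyGetD el 0 0
      let id := PySem.List.pyGetD el 1 0
      let ind_date : Option Int :=
        idDate.foldl (fun ind_date el_date =>
          (PySem.List.pyRange 2 (el_date.length : Int)).foldl (fun ind_date i =>
            if PySem.List.pyGetD el_date 1 0 == type && PySem.List.pyGetD el_date i 0 == id then
              some (((PySem.List.index? idDate el_date).getD 0 : Nat) : Int)
            else ind_date) ind_date) none
      let ind_time : Option Int :=
        idTime.foldl (fun ind_time el_time =>
          (PySem.List.pyRange 2 (el_time.length : Int)).foldl (fun ind_time i =>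
            if PySem.List.pyGetD el_time 1 0 == type && PySem.List.pyGetD el_time i 0 == id then
              some (((PySem.List.index? idTime el_time).getD 0 : Nat) : Int)
            else ind_time) ind_time) none
      -- the normalisation block: `if ind_date != None: … else: …`
      let norm : Int × Int :=
        match ind_date with
        | some dv => (dv, match ind_time with | none => 0 | some tv => tv)
        | none => (-1, 0)
      let k : Int := (PySem.Int.ofStr? (PySem.Int.toStr norm.1 ++ PySem.Int.toStr norm.2)).getD 0
      if dict_elements.contains k = false then dict_elements.insert k [el]
      else dict_elements.modify k [] (fun v => v ++ [el])) PySem.Dict.empty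
  -- `task_or_subtask = []` inside the loop, then extend in sorted-key order
  (PySem.List.sorted dict_elements.keys (fun x => x)).foldl
    (fun task_or_subtask el => task_or_subtask ++ dict_elements.getD el []) []

-- ===== PORT B =====
-- Source B: scan `reversed(rows)`, return rows.index(r) at the first hit, else None
def pvLocate (rows : List (List Int)) (t : Int) (i : Int) : Option Int :=
  match rows.reverse.find? (fun r =>
      decide (2 < r.length) && (PySem.List.pyGetD r 1 0 == t)
        && (PySem.List.slice r (some 2) none).contains i) with
  | some r => some (((PySem.List.index? rows r).getD 0 : Nat) : Int)
  | none => none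

-- Source B: key(el)
def pvKey (idDate : List (List Int)) (idTime : List (List Int)) (el : List Int) : Int :=
  let dtm : Int × Int :=
    match pvLocate idDate (PySem.List.pyGetD el 0 0) (PySem.List.pyGetD el 1 0) with
    | none => (-1, 0)
    | some d => (d, (pvLocate idTime (PySem.List.pyGetD el 0 0) (PySem.List.pyGetD el 1 0)).getD 0)
  (PySem.Int.ofStr? (PySem.Int.toStr dtm.1 ++ PySem.Int.toStr dtm.2)).getD 0

def cycle_idNameTask_idNameSubtask_alt (task_or_subtask : List (List Int)) (idDate : List (List Int)) (idTime : List (List Int)) : List (List Int) :=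
  PySem.List.sorted task_or_subtask (pvKey idDate idTime)

-- ===== PRECONDITION & SPEC =====
-- Pre_ excludes exactly the inputs on which the Python A raises IndexError: an element of
-- task_or_subtask with fewer than two entries (el[0] / el[1]).
def Pre_cycle_idNameTask_idNameSubtask (task_or_subtask : List (List Int)) (idDate : List (List Int)) (idTime : List (List Int)) : Prop :=
  ∀ el ∈ task_or_subtask, 2 ≤ el.length
instance (task_or_subtask : List (List Int)) (idDate : List (List Int)) (idTime : List (List Int)) : Decidable (Pre_cycle_idNameTask_idNameSubtask task_or_subtask idDate idTime) := by unfold Pre_cycle_idNameTask_idNameSubtask; infer_instance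

def pvWitness_cycle_idNameTask_idNameSubtask : List (List Int) × List (List Int) × List (List Int) :=
  ([[1, 5], [2, 7], [1, 7]], [[0, 1, 5], [0, 2, 7]], [[0, 1, 5, 7]])

def Spec_cycle_idNameTask_idNameSubtask (task_or_subtask : List (List Int)) (idDate : List (List Int)) (idTime : List (List Int)) (out : List (List Int)) : Prop := out = cycle_idNameTask_idNameSubtask_alt task_or_subtask idDate idTime
instance (task_or_subtask : List (List Int)) (idDate : List (List Int)) (idTime : List (List Int)) (out : List (List Int)) : Decidable (Spec_cycle_idNameTask_idNameSubtask task_or_subtask idDate idTime out) := by unfold Spec_cycle_idNameTask_idNameSubtask; infer_instance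

-- ===== CLAIM (what is proved, stated in full; the proofs are below) =====
def Claim_equal_cycle_idNameTask_idNameSubtask : Prop := ∀ (task_or_subtask : List (List Int)) (idDate : List (List Int)) (idTime : List (List Int)), Dom_cycle_idNameTask_idNameSubtask task_or_subtask idDate idTime → Pre_cycle_idNameTask_idNameSubtask task_or_subtask idDate idTime → Spec_cycle_idNameTask_idNameSubtask task_or_subtask idDate idTime (cycle_idNameTask_idNameSubtask task_or_subtask idDate idTime)

-- ===== LEMMAS AND PROOFS =====

-- A fold that overwrites an Option with a fixed value on every hit keeps the LAST hit.
theorem pv_foldl_overwrite (l : List (List Int)) (P : List Int → Bool) (f : List Int → Int)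
    (a0 : Option Int) :
    l.foldl (fun acc r => if P r then some (f r) else acc) a0
      = (match l.reverse.find? P with
         | some r => some (f r)
         | none => a0) := by
  induction l generalizing a0 with
  | nil => rfl
  | cons r t ih =>
    simp only [List.foldl_cons, List.reverse_cons, List.find?_append, ih]
    cases h : t.reverse.find? P with
    | some r' => simp [Option.or]
    | none =>
      cases hp : P r <;> simp [Option.or, List.find?, hp]

-- inner fold over the values of row.drop 2, overwriting with a constant
theorem pv_foldl_inner (l : List Int) (c : Bool) (idv : Int) (v : Option Int)
    (a0 : Option Int) :
    l.foldl (fun acc x => if c && (x == idv) then v else acc) a0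
      = if c && l.contains idv then v else a0 := by
  induction l generalizing a0 with
  | nil => simp
  | cons x t ih =>
    simp only [List.foldl_cons, List.contains_cons]
    cases c with
    | false => simpa using ih a0
    | true =>
      simp only [Bool.true_and] at ih ⊢
      by_cases hx : x = idv
      · subst hx
        rw [if_pos (by simp), ih, if_pos (show ((x == x || t.contains x) = true) by simp)]
        split <;> rfl
      · have h1 : (x == idv) = false := by simpa using hx
        have h2 : (idv == x) = false := by simpa using Ne.symm hx
        rw [if_neg (by simp [h1]), ih, h2, Bool.false_or]

theorem pv_pred_eq (t i : Int) (r : List Int) :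
    (decide (2 < r.length) && (PySem.List.pyGetD r 1 0 == t)
        && (PySem.List.slice r (some 2) none).contains i)
      = ((PySem.List.pyGetD r 1 0 == t) && (r.drop 2).contains i) := by
  rw [show PySem.List.slice r (some 2) none = r.drop 2 from
        PySem.List.slice_from r (by norm_num)]
  cases hd : (r.drop 2).contains i with
  | false => simp
  | true =>
    have : 2 < r.length := by
      by_contra h
      have : r.drop 2 = [] := List.drop_eq_nil_of_le (by omega)
      simp [this] at hd
    simp [this]

-- A's ind_date / ind_time loop computes pvLocate.
theorem pv_ind_eq_locate (rows : List (List Int)) (t i : Int) :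
    rows.foldl (fun acc row =>
      (PySem.List.pyRange 2 (row.length : Int)).foldl (fun acc j =>
        if PySem.List.pyGetD row 1 0 == t && PySem.List.pyGetD row j 0 == i then
          some (((PySem.List.index? rows row).getD 0 : Nat) : Int)
        else acc) acc) none
    = pvLocate rows t i := by
  have hrow : ∀ (acc : Option Int) (row : List Int),
      (PySem.List.pyRange 2 (row.length : Int)).foldl (fun acc j =>
        if PySem.List.pyGetD row 1 0 == t && PySem.List.pyGetD row j 0 == i then
          some (((PySem.List.index? rows row).getD 0 : Nat) : Int)
        else acc) acc
      = if (PySem.List.pyGetD row 1 0 == t) && (row.drop 2).contains i then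
          some (((PySem.List.index? rows row).getD 0 : Nat) : Int)
        else acc := by
    intro acc row
    have := PySem.List.foldl_pyRange_pyGetD' row 0
      (fun acc x => if PySem.List.pyGetD row 1 0 == t && (x == i) then
          some (((PySem.List.index? rows row).getD 0 : Nat) : Int) else acc) acc
      (a := 2) (by norm_num)
    simp only at this
    rw [this, pv_foldl_inner]
    rfl
  calc rows.foldl (fun acc row =>
      (PySem.List.pyRange 2 (row.length : Int)).foldl (fun acc j =>
        if PySem.List.pyGetD row 1 0 == t && PySem.List.pyGetD row j 0 == i then
          some (((PySem.List.index? rows row).getD 0 : Nat) : Int)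
        else acc) acc) none
      = rows.foldl (fun acc row =>
          if (PySem.List.pyGetD row 1 0 == t) && (row.drop 2).contains i then
            some (((PySem.List.index? rows row).getD 0 : Nat) : Int)
          else acc) none := by
        exact PySem.List.foldl_congr_mem rows _ _ none (fun acc row _ => hrow acc row)
    _ = pvLocate rows t i := by
        rw [pv_foldl_overwrite]
        unfold pvLocate
        have hfeq : (fun r =>
            decide (2 < r.length) && (PySem.List.pyGetD r 1 0 == t)
              && (PySem.List.slice r (some 2) none).contains i)
          = (fun r : List Int =>
              (PySem.List.pyGetD r 1 0 == t) && (r.drop 2).contains i) :=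
          funext (pv_pred_eq t i)
        rw [hfeq]

-- the dict step of A is a `modify`
theorem pv_dict_step (d : PySem.Dict Int (List (List Int))) (k : Int) (el : List Int) :
    (if d.contains k = false then d.insert k [el] else d.modify k [] (fun v => v ++ [el]))
      = d.modify k [] (fun v => v ++ [el]) := by
  cases h : d.contains k with
  | false =>
    simp [PySem.Dict.modify, PySem.Dict.getD_of_not_contains, h]
  | true => simp

-- ---------- stable-sort = concatenation of buckets over sorted distinct keys ----------

-- filter through insertBy on an already key-sorted list
theorem pv_filter_insertBy {α : Type} (k : α → Int) (c : Int) (x : α) (ys : List α)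
    (hys : ys.Pairwise (fun a b => k a ≤ k b)) :
    (PySem.List.insertBy (fun a b => decide (k a < k b)) x ys).filter (fun y => k y == c)
      = if k x == c then ys.filter (fun y => k y == c) ++ [x]
        else ys.filter (fun y => k y == c) := by
  induction ys with
  | nil =>
    rw [show PySem.List.insertBy (fun a b => decide (k a < k b)) x [] = [x] from rfl]
    rw [List.filter_cons, List.filter_nil]
    by_cases hxc : (k x == c) = true <;> simp [hxc]
  | cons y t ih =>
    rcases List.pairwise_cons.mp hys with ⟨hy, ht⟩
    rw [show PySem.List.insertBy (fun a b => decide (k a < k b)) x (y :: t)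
        = if decide (k x < k y) = true then x :: y :: t
          else y :: PySem.List.insertBy (fun a b => decide (k a < k b)) x t from rfl]
    by_cases hlt : k x < k y
    · rw [if_pos (by simpa using hlt), List.filter_cons]
      by_cases hxc : (k x == c) = true
      · rw [if_pos hxc, if_pos hxc]
        have hnil : (y :: t).filter (fun z => k z == c) = [] := by
          apply List.filter_eq_nil_iff.mpr
          intro z hz
          have hyz : k y ≤ k z := by
            rcases List.mem_cons.mp hz with h | h
            · subst h; exact le_refl _
            · exact hy z h
          have hc' : k x = c := by simpa using hxc
          simp only [beq_iff_eq]
          omega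
        rw [hnil]
        rfl
      · rw [if_neg hxc, if_neg hxc]
    · rw [if_neg (by simpa using hlt), List.filter_cons, List.filter_cons, ih ht]
      by_cases hxc : (k x == c) = true <;> by_cases hyc : (k y == c) = true <;>
        simp [hxc, hyc]

theorem pv_sorted_append_singleton {α : Type} (k : α → Int) (xs : List α) (x : α) :
    PySem.List.sorted (xs ++ [x]) k
      = PySem.List.insertBy (fun a b => decide (k a < k b)) x (PySem.List.sorted xs k) := by
  simp [PySem.List.sorted, List.foldl_append]

-- filter-stability of Python's stable sort
theorem pv_filter_sorted {α : Type} (k : α → Int) (c : Int) (xs : List α) :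
    (PySem.List.sorted xs k).filter (fun y => k y == c) = xs.filter (fun y => k y == c) := by
  induction xs using List.reverseRecOn with
  | nil => rfl
  | append_singleton xs x ih =>
    rw [pv_sorted_append_singleton, pv_filter_insertBy k c x _ (PySem.List.sorted_pairwise xs k),
        ih, List.filter_append]
    by_cases hxc : (k x == c) = true <;> simp [hxc]

-- uniqueness: a key-sorted list is determined by its per-key filters
theorem pv_sorted_unique {α : Type} (k : α → Int) :
    ∀ (l₁ l₂ : List α), l₁.Pairwise (fun a b => k a ≤ k b) → l₂.Pairwise (fun a b => k a ≤ k b) →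
    (∀ c, l₁.filter (fun y => k y == c) = l₂.filter (fun y => k y == c)) → l₁ = l₂ := by
  intro l₁
  induction l₁ with
  | nil =>
    intro l₂ _ _ hf
    cases l₂ with
    | nil => rfl
    | cons b t => have := hf (k b); simp at this
  | cons a t₁ ih =>
    intro l₂ h₁ h₂ hf
    cases l₂ with
    | nil => have := hf (k a); simp at this
    | cons b t₂ =>
      rcases List.pairwise_cons.mp h₁ with ⟨ha, ht₁⟩
      rcases List.pairwise_cons.mp h₂ with ⟨hb, ht₂⟩
      -- k a = k b
      have hmem_b : b ∈ a :: t₁ := by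
        have := hf (k b)
        have hb' : b ∈ (b :: t₂).filter (fun y => k y == k b) := by simp
        rw [← this] at hb'
        exact List.mem_of_mem_filter hb'
      have hmem_a : a ∈ b :: t₂ := by
        have := hf (k a)
        have ha' : a ∈ (a :: t₁).filter (fun y => k y == k a) := by simp
        rw [this] at ha'
        exact List.mem_of_mem_filter ha'
      have hab : k a = k b := by
        have h1 : k a ≤ k b := by
          rcases hmem_b with _ | hb2
          · rfl
          · exact ha b (by assumption)
        have h2 : k b ≤ k a := by
          rcases hmem_a with _ | ha2
          · rfl
          · exact hb a (by assumption)
        omega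
      have heq : a = b := by
        have := hf (k a)
        rw [List.filter_cons, List.filter_cons] at this
        simp only [beq_self_eq_true, if_true] at this
        rw [if_pos (by simp [hab])] at this
        exact (List.cons_eq_cons.mp (by simpa using this)).1
      subst heq
      have htails : ∀ c, t₁.filter (fun y => k y == c) = t₂.filter (fun y => k y == c) := by
        intro c
        have := hf c
        rw [List.filter_cons, List.filter_cons] at this
        by_cases hc : (k a == c) = true
        · rw [if_pos hc, if_pos hc] at this
          exact (List.cons_eq_cons.mp this).2
        · rwa [if_neg hc, if_neg hc] at this
      exact congrArg (a :: ·) (ih t₂ ht₁ ht₂ htails)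

-- flatMap of buckets over a strictly increasing nodup key list, filtered at one key
theorem pv_filter_flatMap_buckets {α : Type} (k : α → Int) (xs : List α) (K : List Int)
    (hnd : K.Nodup) (c : Int) (hc : c ∈ xs.map k → c ∈ K) :
    (K.flatMap (fun kk => xs.filter (fun x => k x == kk))).filter (fun y => k y == c)
      = xs.filter (fun y => k y == c) := by
  induction K with
  | nil =>
    simp only [List.flatMap_nil, List.filter_nil]
    symm
    apply List.filter_eq_nil_iff.mpr
    intro z hz
    simp only [beq_iff_eq]
    intro hzc
    exact absurd (hc (by subst hzc; exact List.mem_map_of_mem hz)) (by simp)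
  | cons k0 Kt ih =>
    rcases List.nodup_cons.mp hnd with ⟨hk0, hndt⟩
    simp only [List.flatMap_cons, List.filter_append]
    by_cases hck : c = k0
    · subst hck
      have h1 : (xs.filter (fun x => k x == c)).filter (fun y => k y == c)
          = xs.filter (fun y => k y == c) := by
        rw [List.filter_filter]; simp
      have h2 : (Kt.flatMap (fun kk => xs.filter (fun x => k x == kk))).filter
          (fun y => k y == c) = [] := by
        apply List.filter_eq_nil_iff.mpr
        intro z hz
        rcases List.mem_flatMap.mp hz with ⟨kk, hkk, hzf⟩
        have := List.of_mem_filter hzf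
        simp only [beq_iff_eq] at this ⊢
        intro hzc
        exact hk0 (by rwa [show kk = c from by rw [← this, hzc]] at hkk)
      rw [h1, h2, List.append_nil]
    · have h1 : (xs.filter (fun x => k x == k0)).filter (fun y => k y == c) = [] := by
        apply List.filter_eq_nil_iff.mpr
        intro z hz
        have := List.of_mem_filter hz
        simp only [beq_iff_eq] at this ⊢
        omega
      rw [h1, List.nil_append]
      exact ih hndt (fun h => by
        rcases List.mem_cons.mp (hc h) with h' | h'
        · exact absurd h' hck
        · exact h')

-- buckets over a strictly increasing key list are key-sorted
theorem pv_buckets_pairwise {α : Type} (k : α → Int) (xs : List α) (K : List Int)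
    (hK : K.Pairwise (· < ·)) :
    (K.flatMap (fun kk => xs.filter (fun x => k x == kk))).Pairwise
      (fun a b => k a ≤ k b) := by
  apply List.pairwise_flatMap.mpr
  constructor
  · intro kk _
    apply List.pairwise_of_forall_mem_list
    intro a ha b hb
    have h1 := List.of_mem_filter (p := fun x => k x == kk) ha
    have h2 := List.of_mem_filter (p := fun x => k x == kk) hb
    simp only [beq_iff_eq] at h1 h2
    rw [h1, h2]
  · refine hK.imp ?_
    intro a b hab x hx y hy
    have h1 := List.of_mem_filter (p := fun z => k z == a) hx
    have h2 := List.of_mem_filter (p := fun z => k z == b) hy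
    simp only [beq_iff_eq] at h1 h2
    rw [h1, h2]
    exact le_of_lt hab

-- the master grouping lemma: stable sort = buckets over sorted distinct keys
theorem pv_sorted_eq_buckets {α : Type} (k : α → Int) (xs : List α) :
    PySem.List.sorted xs k
      = (PySem.List.sorted (PySem.Set.ofList (xs.map k)) (fun x => x)).flatMap
          (fun kk => xs.filter (fun x => k x == kk)) := by
  have hK : (PySem.List.sorted (PySem.Set.ofList (xs.map k)) (fun x => x)).Pairwise
      (· < ·) := PySem.List.sorted_ofList_pairwise_lt (xs.map k)
  have hnd : (PySem.List.sorted (PySem.Set.ofList (xs.map k)) (fun x => x)).Nodup :=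
    hK.imp (fun h => ne_of_lt h)
  apply pv_sorted_unique k
  · exact PySem.List.sorted_pairwise xs k
  · exact pv_buckets_pairwise k xs _ hK
  · intro c
    rw [pv_filter_sorted, pv_filter_flatMap_buckets k xs _ hnd c]
    intro hcm
    rw [PySem.List.mem_sorted]
    exact (PySem.Set.mem_ofList _ _).mpr hcm

-- A's whole dict phase produces exactly the buckets of B's stable sort
theorem pv_A_eq_buckets (task_or_subtask idDate idTime : List (List Int)) :
    cycle_idNameTask_idNameSubtask task_or_subtask idDate idTime
      = cycle_idNameTask_idNameSubtask_alt task_or_subtask idDate idTime := by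
  unfold cycle_idNameTask_idNameSubtask cycle_idNameTask_idNameSubtask_alt
  have hstep : List.foldl
      (fun dict_elements el =>
        let type := PySem.List.pyGetD el 0 0
        let id := PySem.List.pyGetD el 1 0
        let ind_date : Option Int :=
          idDate.foldl (fun ind_date el_date =>
            (PySem.List.pyRange 2 (el_date.length : Int)).foldl (fun ind_date i =>
              if PySem.List.pyGetD el_date 1 0 == type && PySem.List.pyGetD el_date i 0 == id then
                some (((PySem.List.index? idDate el_date).getD 0 : Nat) : Int)
              else ind_date) ind_date) none
        let ind_time : Option Int :=
          idTime.foldl (fun ind_time el_time =>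
            (PySem.List.pyRange 2 (el_time.length : Int)).foldl (fun ind_time i =>
              if PySem.List.pyGetD el_time 1 0 == type && PySem.List.pyGetD el_time i 0 == id then
                some (((PySem.List.index? idTime el_time).getD 0 : Nat) : Int)
              else ind_time) ind_time) none
        let norm : Int × Int :=
          match ind_date with
          | some dv => (dv, match ind_time with | none => 0 | some tv => tv)
          | none => (-1, 0)
        let k : Int := (PySem.Int.ofStr? (PySem.Int.toStr norm.1 ++ PySem.Int.toStr norm.2)).getD 0
        if dict_elements.contains k = false then dict_elements.insert k [el]
        else dict_elements.modify k [] (fun v => v ++ [el]))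
      PySem.Dict.empty task_or_subtask
    = List.foldl (fun d el => d.modify (pvKey idDate idTime el) [] (fun v => v ++ [el]))
        PySem.Dict.empty task_or_subtask := by
    apply PySem.List.foldl_congr_mem
    intro d el _
    simp only [pv_ind_eq_locate]
    rw [pv_dict_step]
    unfold pvKey
    cases hD : pvLocate idDate (PySem.List.pyGetD el 0 0) (PySem.List.pyGetD el 1 0) with
    | none => rfl
    | some dv =>
      cases hT : pvLocate idTime (PySem.List.pyGetD el 0 0) (PySem.List.pyGetD el 1 0) with
      | none => rfl
      | some tv => rfl
  rw [hstep, PySem.List.foldl_append_eq_flatMap, List.nil_append]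
  have hkeys : (List.foldl (fun d el => d.modify (pvKey idDate idTime el) [] (fun v => v ++ [el])) PySem.Dict.empty task_or_subtask).keys
      = PySem.Set.ofList (task_or_subtask.map (pvKey idDate idTime)) := by
    rw [PySem.Dict.keys_foldl_modify_key task_or_subtask (pvKey idDate idTime) []
        (fun _ el => (fun v => v ++ [el])) PySem.Dict.empty]
    rw [PySem.Dict.keys_empty, PySem.Set.update_eq_append_filter, List.nil_append]
    simp [PySem.Set.contains]
  have hgetD : ∀ c, (List.foldl (fun d el => d.modify (pvKey idDate idTime el) [] (fun v => v ++ [el])) PySem.Dict.empty task_or_subtask).getD c []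
      = task_or_subtask.filter (fun x => pvKey idDate idTime x == c) := by
    intro c
    have h := PySem.Dict.getD_foldl_modify_append
      (task_or_subtask.map (fun el => (pvKey idDate idTime el, el))) PySem.Dict.empty c
    rw [List.foldl_map] at h
    simp only at h
    rw [PySem.Dict.getD_empty, List.nil_append] at h
    rw [h]
    simp [List.filter_map, List.map_map, Function.comp_def]
  have hfun : (fun c => (List.foldl (fun d el => d.modify (pvKey idDate idTime el) [] (fun v => v ++ [el])) PySem.Dict.empty task_or_subtask).getD c [])
      = (fun c => task_or_subtask.filter (fun x => pvKey idDate idTime x == c)) :=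
    funext hgetD
  rw [hkeys, hfun]
  exact (pv_sorted_eq_buckets (pvKey idDate idTime) task_or_subtask).symm

-- ===== VERDICT (by name: the statement is the Claim_ definition above) =====
theorem cycle_idNameTask_idNameSubtask_spec : Claim_equal_cycle_idNameTask_idNameSubtask := by
  intro task_or_subtask idDate idTime _ _
  unfold Spec_cycle_idNameTask_idNameSubtask
  exact pv_A_eq_buckets task_or_subtask idDate idTime
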